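-- pv_equiv track=rewrite | github.com/Ang-Andrew/aoc_2025 | day3/hw/scripts/precompute_results_correct.py | compute_line_score
-- ===== SOURCE A (Python) =====
-- def compute_line_score(digits):
--     """
--     Compute the final score for one line using the streaming algorithm.
--     This matches solve_line_streaming() from solution.py
--     """
--     if len(digits) < 2:
--         return 0
--
--     max_seen_digit = digits[0]
--     overall_max = 0
--
--     for i in range(1, len(digits)):
--         current_digit = digits[i]
--         current_score = max_seen_digit * 10 + current_digit
--         if current_score > overall_max:
--             overall_max = current_score
--
--         if current_digit > max_seen_digit:
--             max_seen_digit = current_digit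
--
--     return overall_max
-- ===== SOURCE B (Python) =====
-- def compute_line_score(digits):
--     # Two passes: build the running-maximum (prefix-max) table, then reduce
--     # over the pairs (prefix max so far, next digit).
--     if len(digits) < 2:
--         return 0
--     pref = []
--     m = digits[0]
--     for d in digits:
--         m = m if m >= d else d
--         pref.append(m)
--     return max([0] + [p * 10 + d for p, d in zip(pref, digits[1:])])
-- ===== Notes on version B (the rewrite author's own statement) =====
-- stated objective: idiomatic
-- what changed: Replaced the fused streaming loop (two mutable accumulators updated together) by a two-pass decomposition: first build the prefix-max table, then take the max of 0 and p*10+d over zip(pref, digits[1:]).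
import Mathlib
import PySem

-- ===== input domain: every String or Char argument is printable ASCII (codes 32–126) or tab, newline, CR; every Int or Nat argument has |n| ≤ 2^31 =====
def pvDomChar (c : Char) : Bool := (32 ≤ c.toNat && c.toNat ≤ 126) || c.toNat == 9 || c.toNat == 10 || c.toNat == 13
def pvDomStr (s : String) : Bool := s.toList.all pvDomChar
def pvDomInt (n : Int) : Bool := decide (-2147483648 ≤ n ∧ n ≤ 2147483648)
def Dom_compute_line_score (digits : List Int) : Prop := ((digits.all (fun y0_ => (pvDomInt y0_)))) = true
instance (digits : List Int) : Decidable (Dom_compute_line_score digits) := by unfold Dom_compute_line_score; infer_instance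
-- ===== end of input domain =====

-- B replaces A's fused streaming loop by a two-pass decomposition (prefix-max table, then a reduce over zipped pairs); same O(n) cost, more idiomatic.


-- ===== PORT A =====
-- the for-loop over digits[1:] carrying (max_seen_digit, overall_max)
def compute_line_score (digits : List Int) : Int :=
  if digits.length < 2 then 0
  else
    match digits with
    | [] => 0  -- unreachable: length ≥ 2
    | d0 :: rest =>
      (rest.foldl (fun (st : Int × Int) current_digit =>
        let current_score := st.1 * 10 + current_digit
        let overall := if current_score > st.2 then current_score else st.2
        let max_seen := if current_digit > st.1 then current_digit else st.1
        (max_seen, overall)) (d0, 0)).2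

-- ===== PORT B =====
-- first pass of Source B: pref list of running maxima, seeded with digits[0]
def prefMaxes (m : Int) (ds : List Int) : List Int :=
  match ds with
  | [] => []
  | d :: rest =>
    let m' := if m ≥ d then m else d
    m' :: prefMaxes m' rest

def compute_line_score_alt (digits : List Int) : Int :=
  if digits.length < 2 then 0
  else
    match digits with
    | [] => 0  -- unreachable: length ≥ 2
    | d0 :: _ =>
      let pref := prefMaxes d0 digits
      -- max([0] + [p*10+d for p,d in zip(pref, digits[1:])])
      ((pref.zip (digits.drop 1)).map (fun pd => pd.1 * 10 + pd.2)).foldl max 0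

-- ===== PRECONDITION & SPEC =====
def Spec_compute_line_score (digits : List Int) (out : Int) : Prop := out = compute_line_score_alt digits
instance (digits : List Int) (out : Int) : Decidable (Spec_compute_line_score digits out) := by unfold Spec_compute_line_score; infer_instance

-- ===== CLAIM (what is proved, stated in full; the proofs are below) =====
def Claim_equal_compute_line_score : Prop := ∀ (digits : List Int), Dom_compute_line_score digits → Spec_compute_line_score digits (compute_line_score digits)

-- ===== LEMMAS AND PROOFS =====

-- loop invariant: A's fused fold equals B's reduce over the zipped prefix-max table
theorem loop_eq (rest : List Int) : ∀ (m o : Int),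
    (rest.foldl (fun (st : Int × Int) current_digit =>
        let current_score := st.1 * 10 + current_digit
        let overall := if current_score > st.2 then current_score else st.2
        let max_seen := if current_digit > st.1 then current_digit else st.1
        (max_seen, overall)) (m, o)).2
    = (((m :: prefMaxes m rest).zip rest).map (fun pd => pd.1 * 10 + pd.2)).foldl max o := by
  induction rest with
  | nil => intro m o; simp
  | cons d t ih =>
    intro m o
    simp only [List.foldl_cons, prefMaxes, List.zip_cons_cons, List.map_cons]
    have hm : (if d > m then d else m) = (if m ≥ d then m else d) := by
      split_ifs <;> omega
    have ho : (if m * 10 + d > o then m * 10 + d else o) = max o (m * 10 + d) := by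
      rw [max_comm]; simp [max_def, le_iff_lt_or_eq]
      split_ifs <;> omega
    rw [hm, ho]
    exact ih _ _

theorem compute_line_score_eq_alt (digits : List Int) :
    compute_line_score digits = compute_line_score_alt digits := by
  unfold compute_line_score compute_line_score_alt
  split
  · rfl
  · match digits with
    | [] => rfl
    | d0 :: rest =>
      simp only [List.drop_succ_cons, List.drop_zero, prefMaxes]
      rw [loop_eq]
      have : (if d0 ≥ d0 then d0 else d0) = d0 := by simp
      rw [this]

-- ===== VERDICT (by name: the statement is the Claim_ definition above) =====
theorem compute_line_score_spec : Claim_equal_compute_line_score := by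
  intro digits _
  unfold Spec_compute_line_score
  exact compute_line_score_eq_alt digits
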